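-- pv_equiv track=rewrite | github.com/Alignc0/Ai_Sneake_game | yılan_ai_astar.py | hayatta_kalabilir_mi
-- ===== SOURCE A (Python) =====
-- from collections import deque
--
-- GENISLIK = 600
--
-- YUKSEKLIK = 400
--
-- BLOK_BOYUTU = 20
--
-- YUKARI = (0, -1)
--
-- ASAGI = (0, 1)
--
-- SOL = (-1, 0)
--
-- SAG = (1, 0)
--
-- def carpisma_kontrolu(pozisyon, yilan_pozisyonlari):
--     if pozisyon[0] >= GENISLIK or pozisyon[0] < 0 or pozisyon[1] >= YUKSEKLIK or pozisyon[1] < 0: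
--         return True
--     if pozisyon in yilan_pozisyonlari:
--         return True
--     return False
--
-- def flood_fill(baslangic, yilan_pozisyonlari):
--     ziyaret_edilen = set()
--     kuyruk = deque([baslangic])
--     sayac = 0
--
--     while kuyruk:
--         poz = kuyruk.popleft()
--         if poz in ziyaret_edilen or carpisma_kontrolu(poz, yilan_pozisyonlari):
--             continue
--         ziyaret_edilen.add(poz)
--         sayac += 1
--         for yon in [YUKARI, ASAGI, SOL, SAG]:
--             komsu = (poz[0] + yon[0]*BLOK_BOYUTU, poz[1] + yon[1]*BLOK_BOYUTU)
--             if komsu not in ziyaret_edilen: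
--                 kuyruk.append(komsu)
--
--     return sayac
--
-- def hayatta_kalabilir_mi(baslangic, engeller, hamle_sayisi):
--     kafa = baslangic
--     for _ in range(hamle_sayisi):
--         max_doluluk = -1
--         en_iyi_hamle = None
--         for yon in [YUKARI, ASAGI, SOL, SAG]:
--             komsu = (kafa[0] + yon[0]*BLOK_BOYUTU, kafa[1] + yon[1]*BLOK_BOYUTU)
--             if carpisma_kontrolu(komsu, engeller):
--                 continue
--             bosluk = flood_fill(komsu, engeller)
--             if bosluk > max_doluluk:
--                 max_doluluk = bosluk
--                 en_iyi_hamle = yon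
--         if en_iyi_hamle:
--             kafa = (kafa[0] + en_iyi_hamle[0]*BLOK_BOYUTU, kafa[1] + en_iyi_hamle[1]*BLOK_BOYUTU)
--             engeller.insert(0, kafa)
--             engeller.pop()
--         else:
--             return False
--     return True
-- ===== SOURCE B (Python) =====
-- # Same greedy survival check; the reachable-area count is a recursive DFS instead of a
-- # BFS queue, and the best move is picked with max() over the legal neighbour cells.
-- # Like the original, it rotates `engeller` in place (new head in front, tail dropped).
--
-- GENISLIK = 600
-- YUKSEKLIK = 400
-- BLOK_BOYUTU = 20
--
--
-- def hayatta_kalabilir_mi(baslangic, engeller, hamle_sayisi):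
--     def serbest(poz):
--         x, y = poz
--         return 0 <= x < GENISLIK and 0 <= y < YUKSEKLIK and poz not in engeller
--
--     def alan(poz, gorulen):
--         if poz in gorulen or not serbest(poz):
--             return 0
--         gorulen.add(poz)
--         x, y = poz
--         b = BLOK_BOYUTU
--         return (1 + alan((x, y - b), gorulen) + alan((x, y + b), gorulen)
--                   + alan((x - b, y), gorulen) + alan((x + b, y), gorulen))
--
--     kafa = baslangic
--     for _ in range(hamle_sayisi):
--         b = BLOK_BOYUTU
--         komsular = ((kafa[0], kafa[1] - b), (kafa[0], kafa[1] + b),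
--                     (kafa[0] - b, kafa[1]), (kafa[0] + b, kafa[1]))
--         adaylar = [(alan(komsu, set()), komsu) for komsu in komsular if serbest(komsu)]
--         if not adaylar:
--             return False
--         _, kafa = max(adaylar, key=lambda aday: aday[0])
--         engeller.insert(0, kafa)
--         engeller.pop()
--     return True
-- ===== Notes on version B (the rewrite author's own statement) =====
-- stated objective: alternative
-- what changed: the reachable-area count is a recursive DFS over the grid instead of A's BFS with an explicit deque/visited-set/counter loop, and the best move is picked with max() over a comprehension of the legal neighbour cells instead of A's running-max/best-move accumulator with a -1 sentinel.
import Mathlib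
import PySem

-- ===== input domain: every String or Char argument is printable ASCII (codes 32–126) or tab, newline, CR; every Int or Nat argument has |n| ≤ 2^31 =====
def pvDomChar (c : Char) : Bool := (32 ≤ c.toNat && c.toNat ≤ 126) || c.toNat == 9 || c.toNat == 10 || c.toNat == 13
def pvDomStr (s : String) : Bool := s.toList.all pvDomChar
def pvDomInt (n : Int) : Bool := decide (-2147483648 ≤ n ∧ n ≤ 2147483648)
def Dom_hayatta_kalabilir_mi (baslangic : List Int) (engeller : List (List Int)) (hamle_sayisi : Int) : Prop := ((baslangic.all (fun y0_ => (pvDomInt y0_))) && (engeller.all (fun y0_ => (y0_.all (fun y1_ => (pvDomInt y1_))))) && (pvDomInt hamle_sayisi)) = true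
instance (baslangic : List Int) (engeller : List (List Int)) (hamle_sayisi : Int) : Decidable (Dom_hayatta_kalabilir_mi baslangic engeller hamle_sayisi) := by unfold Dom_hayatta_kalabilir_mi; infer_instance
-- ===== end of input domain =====

-- ===== PORT A =====

-- B counts reachable free space with a recursive DFS (instead of A's BFS queue) and picks
-- the best move with max() over the legal neighbour cells (instead of A's running-max loop);
-- equivalence is about the RETURN value (both rotate `engeller` in place the same way).

abbrev Cell : Type := Int × Int

-- a Python value stored in the `engeller` list: an original list entry or an inserted
-- (x, y) tuple — in Python a tuple never compares equal to a list, modelled here by the tag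
inductive PyObs where
  | lst : List Int → PyObs
  | tup : Int → Int → PyObs
deriving DecidableEq

-- ===== PORT A =====  (literal transliteration; engeller entries are tagged Python values)
def dirsA : List Cell := [(0, -1), (0, 1), (-1, 0), (1, 0)]

def carpisma_kontrolu (pozisyon : Cell) (yilan_pozisyonlari : List PyObs) : Bool :=
  if 600 ≤ pozisyon.1 || pozisyon.1 < 0 || 400 ≤ pozisyon.2 || pozisyon.2 < 0 then true
  else if PyObs.tup pozisyon.1 pozisyon.2 ∈ yilan_pozisyonlari then true
  else false

-- the inner neighbour loop of flood_fill, as a named helper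
def komsuEkle (ziyaret : PySem.Set Cell) (poz : Cell) (kuyruk : List Cell) : List Cell :=
  dirsA.foldl
    (fun acc yon =>
      if !(decide ((poz.1 + yon.1 * 20, poz.2 + yon.2 * 20) ∈ ziyaret)) then
        acc ++ [(poz.1 + yon.1 * 20, poz.2 + yon.2 * 20)]
      else acc) kuyruk

-- the BFS while-loop; fuel only makes it total (flood_fill passes enough fuel: the loop
-- runs at most 5·240000+1 rounds, see the unvisited_le / floodLoopF lemmas below)
def floodLoopF (fuel : Nat) (obs : List PyObs) (visited : PySem.Set Cell) (queue : List Cell) (sayac : Int) :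
    PySem.Set Cell × Int :=
  match fuel, queue with
  | _, [] => (visited, sayac)
  | 0, _ => (visited, sayac)
  | Nat.succ fuel, poz :: rest =>
    if decide (poz ∈ visited) || carpisma_kontrolu poz obs then
      floodLoopF fuel obs visited rest sayac
    else
      let visited' := PySem.Set.add visited poz
      floodLoopF fuel obs visited' (komsuEkle visited' poz rest) (sayac + 1)

def flood_fill (baslangic : Cell) (yilan_pozisyonlari : List PyObs) : Int :=
  (floodLoopF 1200002 yilan_pozisyonlari PySem.Set.empty [baslangic] 0).2

def survLoopA (kafa : List Int) (engeller : List PyObs) : Nat → Bool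
  | 0 => true
  | Nat.succ n =>
    -- kafa[0] / kafa[1]: IndexError (kafa too short) is excluded by Pre_
    let k0 := (PySem.List.pyGet? kafa 0).getD 0
    let k1 := (PySem.List.pyGet? kafa 1).getD 0
    let sel := dirsA.foldl
      (fun (st : Int × Option Cell) yon =>
        if carpisma_kontrolu (k0 + yon.1 * 20, k1 + yon.2 * 20) engeller then st
        else
          let bosluk := flood_fill (k0 + yon.1 * 20, k1 + yon.2 * 20) engeller
          if st.1 < bosluk then (bosluk, some yon) else st)
      ((-1 : Int), (none : Option Cell))
    match sel.2 with
    | none => false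
    | some yon =>
      survLoopA [k0 + yon.1 * 20, k1 + yon.2 * 20]
        ((PyObs.tup (k0 + yon.1 * 20) (k1 + yon.2 * 20) :: engeller).dropLast) n

def hayatta_kalabilir_mi (baslangic : List Int) (engeller : List (List Int)) (hamle_sayisi : Int) : Bool :=
  survLoopA baslangic (engeller.map PyObs.lst) hamle_sayisi.toNat

-- ===== PORT B =====  (Source B: recursive DFS area count, best move by max() over candidates)
def serbest (engeller : List PyObs) (poz : Cell) : Bool :=
  decide (0 ≤ poz.1) && decide (poz.1 < 600) && decide (0 ≤ poz.2) && decide (poz.2 < 400) &&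
    decide (PyObs.tup poz.1 poz.2 ∉ engeller)

-- Source B's recursive `alan`; fuel only makes it total (`alan` passes enough: every recursive
-- call has marked a fresh in-bounds cell, see the unvisited_le / alanF lemmas below)
def alanF (fuel : Nat) (engeller : List PyObs) (poz : Cell) (gorulen : PySem.Set Cell) :
    PySem.Set Cell × Int :=
  match fuel with
  | 0 => (gorulen, 0)
  | Nat.succ fuel =>
    if decide (poz ∈ gorulen) || !(serbest engeller poz) then (gorulen, 0)
    else
      let gorulen' := PySem.Set.add gorulen poz
      let r1 := alanF fuel engeller (poz.1, poz.2 - 20) gorulen'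
      let r2 := alanF fuel engeller (poz.1, poz.2 + 20) r1.1
      let r3 := alanF fuel engeller (poz.1 - 20, poz.2) r2.1
      let r4 := alanF fuel engeller (poz.1 + 20, poz.2) r3.1
      (r4.1, 1 + r1.2 + r2.2 + r3.2 + r4.2)

def alan (engeller : List PyObs) (poz : Cell) (gorulen : PySem.Set Cell) : PySem.Set Cell × Int :=
  alanF 240001 engeller poz gorulen

def survLoopB (kafa : List Int) (engeller : List PyObs) : Nat → Bool
  | 0 => true
  | Nat.succ n =>
    let k0 := (PySem.List.pyGet? kafa 0).getD 0
    let k1 := (PySem.List.pyGet? kafa 1).getD 0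
    let komsular : List Cell := [(k0, k1 - 20), (k0, k1 + 20), (k0 - 20, k1), (k0 + 20, k1)]
    let adaylar := (komsular.filter (serbest engeller)).map
      (fun komsu => ((alan engeller komsu PySem.Set.empty).2, komsu))
    match PySem.List.max? adaylar (fun aday => aday.1) with
    | none => false
    | some aday =>
      survLoopB [aday.2.1, aday.2.2] ((PyObs.tup aday.2.1 aday.2.2 :: engeller).dropLast) n

def hayatta_kalabilir_mi_alt (baslangic : List Int) (engeller : List (List Int)) (hamle_sayisi : Int) : Bool :=
  survLoopB baslangic (engeller.map PyObs.lst) hamle_sayisi.toNat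

-- ===== PRECONDITION & SPEC =====
-- Pre_ excludes exactly the inputs on which A raises: with at least one move requested,
-- kafa[0]/kafa[1] need len(baslangic) ≥ 2 (IndexError otherwise).
def Pre_hayatta_kalabilir_mi (baslangic : List Int) (engeller : List (List Int)) (hamle_sayisi : Int) : Prop :=
  hamle_sayisi ≤ 0 ∨ 2 ≤ baslangic.length
instance (baslangic : List Int) (engeller : List (List Int)) (hamle_sayisi : Int) : Decidable (Pre_hayatta_kalabilir_mi baslangic engeller hamle_sayisi) := by unfold Pre_hayatta_kalabilir_mi; infer_instance

def pvWitness_hayatta_kalabilir_mi : List Int × List (List Int) × Int := ([100, 100], [[40, 40]], 3)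

def Spec_hayatta_kalabilir_mi (baslangic : List Int) (engeller : List (List Int)) (hamle_sayisi : Int) (out : Bool) : Prop := out = hayatta_kalabilir_mi_alt baslangic engeller hamle_sayisi
instance (baslangic : List Int) (engeller : List (List Int)) (hamle_sayisi : Int) (out : Bool) : Decidable (Spec_hayatta_kalabilir_mi baslangic engeller hamle_sayisi out) := by unfold Spec_hayatta_kalabilir_mi; infer_instance

-- ===== CLAIM =====
def Claim_equal_hayatta_kalabilir_mi : Prop := ∀ (baslangic : List Int) (engeller : List (List Int)) (hamle_sayisi : Int), Dom_hayatta_kalabilir_mi baslangic engeller hamle_sayisi → Pre_hayatta_kalabilir_mi baslangic engeller hamle_sayisi → Spec_hayatta_kalabilir_mi baslangic engeller hamle_sayisi (hayatta_kalabilir_mi baslangic engeller hamle_sayisi)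

-- ===== LEMMAS AND PROOFS =====

-- in-bounds grid cells; `unvisited` bounds the fuel of both flood fills
def gridPts : List Cell :=
  (PySem.List.pyRange 0 600 1).flatMap fun x => (PySem.List.pyRange 0 400 1).map fun y => (x, y)

def unvisited (v : PySem.Set Cell) : Nat :=
  (gridPts.filter fun q => !(PySem.Set.contains v q)).length

theorem mem_gridPts (p : Cell) :
    p ∈ gridPts ↔ (0 ≤ p.1 ∧ p.1 < 600 ∧ 0 ≤ p.2 ∧ p.2 < 400) := by
  cases p with
  | mk x y =>
    simp only [gridPts, List.mem_flatMap, List.mem_map, PySem.List.mem_pyRange_one, Prod.mk.injEq]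
    constructor
    · rintro ⟨a, ⟨h1, h2⟩, b, ⟨h3, h4⟩, he, hf⟩
      exact ⟨he ▸ h1, he ▸ h2, hf ▸ h3, hf ▸ h4⟩
    · rintro ⟨h1, h2, h3, h4⟩
      exact ⟨x, ⟨h1, h2⟩, y, ⟨h3, h4⟩, rfl, rfl⟩

theorem filter_length_lt {α : Type} (l : List α) (f g : α → Bool)
    (hfg : ∀ x, g x = true → f x = true) (p : α) (hp : p ∈ l)
    (hf : f p = true) (hg : g p = false) :
    (l.filter g).length < (l.filter f).length := by
  induction l with
  | nil => cases hp
  | cons a t ih =>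
    have hle : (t.filter g).length ≤ (t.filter f).length :=
      List.Sublist.length_le (List.monotone_filter_right t (by intro x hx; exact hfg x hx))
    rcases List.mem_cons.mp hp with h | h
    · subst h
      simp [hf, hg]
      omega
    · have hlt := ih h
      by_cases hga : g a = true
      · simp [hga, hfg a hga]; omega
      · simp only [Bool.not_eq_true] at hga
        by_cases hfa : f a = true
        · simp [hga, hfa]; omega
        · simp only [Bool.not_eq_true] at hfa
          simp [hga, hfa]; omega

theorem unvisited_mono (v w : PySem.Set Cell) (h : ∀ x, x ∈ v → x ∈ w) :
    unvisited w ≤ unvisited v := by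
  unfold unvisited
  apply List.Sublist.length_le
  apply List.monotone_filter_right
  intro x hx
  simp only [Bool.not_eq_true'] at hx ⊢
  cases hcv : PySem.Set.contains v x
  · rfl
  · exfalso
    have := h x ((PySem.Set.contains_iff _ _).mp hcv)
    rw [(PySem.Set.contains_iff _ _).mpr this] at hx; cases hx

theorem unvisited_lt_add (v : PySem.Set Cell) (p : Cell)
    (hg : p ∈ gridPts) (hv : p ∉ v) :
    unvisited (PySem.Set.add v p) < unvisited v := by
  unfold unvisited
  refine filter_length_lt gridPts _ _ ?_ p hg ?_ ?_
  · intro x hx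
    simp only [Bool.not_eq_true'] at hx ⊢
    cases hcv : PySem.Set.contains v x
    · rfl
    · exfalso
      have : x ∈ PySem.Set.add v p :=
        (PySem.Set.mem_add _ _ _).mpr (Or.inl ((PySem.Set.contains_iff _ _).mp hcv))
      rw [(PySem.Set.contains_iff _ _).mpr this] at hx; cases hx
  · show (!PySem.Set.contains v p) = true
    cases h : PySem.Set.contains v p
    · rfl
    · exact absurd ((PySem.Set.contains_iff _ _).mp h) hv
  · show (!PySem.Set.contains (PySem.Set.add v p) p) = false
    rw [(PySem.Set.contains_iff _ _).mpr ((PySem.Set.mem_add _ _ _).mpr (Or.inr rfl))]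
    rfl

theorem gridPts_length : gridPts.length = 240000 := by
  unfold gridPts
  rw [List.length_flatMap]
  simp only [List.length_map, PySem.List.length_pyRange_one]
  norm_num
  decide

theorem unvisited_le (v : PySem.Set Cell) : unvisited v ≤ 240000 := by
  calc unvisited v ≤ gridPts.length := List.length_filter_le _ _
    _ = 240000 := gridPts_length

theorem komsuEkle_eq (ziyaret : PySem.Set Cell) (poz : Cell) (kuyruk : List Cell) :
    komsuEkle ziyaret poz kuyruk = kuyruk ++
      (dirsA.filter (fun yon => !(decide ((poz.1 + yon.1 * 20, poz.2 + yon.2 * 20) ∈ ziyaret)))).map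
        (fun yon => (poz.1 + yon.1 * 20, poz.2 + yon.2 * 20)) := by
  unfold komsuEkle
  rw [PySem.List.foldl_append_if]

theorem komsuEkle_len (ziyaret : PySem.Set Cell) (poz : Cell) (kuyruk : List Cell) :
    (komsuEkle ziyaret poz kuyruk).length ≤ kuyruk.length + 4 := by
  rw [komsuEkle_eq]
  have h4 : (dirsA.filter (fun yon => !(decide ((poz.1 + yon.1 * 20, poz.2 + yon.2 * 20) ∈ ziyaret)))).length ≤ dirsA.length :=
    List.length_filter_le _ _
  have h5 : dirsA.length = 4 := rfl
  simp only [List.length_append, List.length_map]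
  omega

-- the four grid neighbours of a cell; reachability through free cells
def nbrsOf (p : Cell) : List Cell := [(p.1, p.2 - 20), (p.1, p.2 + 20), (p.1 - 20, p.2), (p.1 + 20, p.2)]

def stepR (free : Cell → Bool) (a b : Cell) : Prop := b ∈ nbrsOf a ∧ free b = true

def Good (free : Cell → Bool) (s t : Cell) : Prop :=
  free s = true ∧ Relation.ReflTransGen (stepR free) s t

def freeA (obs : List PyObs) : Cell → Bool := fun p => !(carpisma_kontrolu p obs)

theorem serbest_eq (eng : List PyObs) (p : Cell) :
    serbest eng p = freeA eng p := by
  unfold serbest freeA carpisma_kontrolu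
  by_cases h1 : (600 ≤ p.1 || p.1 < 0 || 400 ≤ p.2 || p.2 < 0) = true
  · rw [if_pos h1]
    simp only [Bool.or_eq_true, decide_eq_true_eq] at h1
    simp only [Bool.not_true, Bool.and_eq_false_iff]
    simp only [decide_eq_false_iff_not, not_le, not_lt]
    omega
  · rw [if_neg h1]
    simp only [Bool.or_eq_true, decide_eq_true_eq, not_or] at h1
    by_cases h2 : PyObs.tup p.1 p.2 ∈ eng
    · rw [if_pos h2]
      simp [h2]
    · rw [if_neg h2]
      simp only [Bool.not_false]
      simp only [Bool.and_eq_true, decide_eq_true_eq]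
      refine ⟨⟨⟨⟨?_, ?_⟩, ?_⟩, ?_⟩, h2⟩ <;> omega

theorem map_dirsA (p : Cell) :
    dirsA.map (fun yon => (p.1 + yon.1 * 20, p.2 + yon.2 * 20)) = nbrsOf p := by
  simp [dirsA, nbrsOf, Prod.ext_iff]
  omega

theorem freeA_in_grid (obs : List PyObs) (p : Cell) (h : freeA obs p = true) : p ∈ gridPts := by
  rw [mem_gridPts]
  unfold freeA carpisma_kontrolu at h
  split at h
  · cases h
  · rename_i hb
    simp at hb
    omega

-- === BFS side ===
theorem floodLoopF_nodup (fuel : Nat) (obs : List PyObs) (v : PySem.Set Cell) (q : List Cell) (c : Int)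
    (hv : v.Nodup) : (floodLoopF fuel obs v q c).1.Nodup := by
  induction fuel generalizing v q c with
  | zero => cases q <;> simpa [floodLoopF] using hv
  | succ f ih =>
    cases q with
    | nil => simpa [floodLoopF] using hv
    | cons poz rest =>
      simp only [floodLoopF]
      by_cases hc : (decide (poz ∈ v) || carpisma_kontrolu poz obs) = true
      · rw [if_pos hc]; exact ih _ _ _ hv
      · rw [if_neg hc]; exact ih _ _ _ (PySem.Set.nodup_add _ _ hv)

theorem floodLoopF_count (fuel : Nat) (obs : List PyObs) (v : PySem.Set Cell) (q : List Cell) (c : Int) :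
    (floodLoopF fuel obs v q c).2 = c + ((floodLoopF fuel obs v q c).1.length : Int) - (v.length : Int) := by
  induction fuel generalizing v q c with
  | zero => cases q <;> (simp [floodLoopF]; try omega)
  | succ f ih =>
    cases q with
    | nil => simp [floodLoopF]
    | cons poz rest =>
      simp only [floodLoopF]
      by_cases hc : (decide (poz ∈ v) || carpisma_kontrolu poz obs) = true
      · rw [if_pos hc]; exact ih _ _ _
      · rw [if_neg hc]
        have hnm : poz ∉ v := by
          intro hm
          simp only [Bool.or_eq_true, not_or, Bool.not_eq_true] at hc
          exact absurd hm (of_decide_eq_false hc.1)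
        have hlen : (PySem.Set.add v poz).length = v.length + 1 := by
          rw [PySem.Set.add_of_not_mem hnm, List.length_append]
          rfl
        have := ih (PySem.Set.add v poz) (komsuEkle (PySem.Set.add v poz) poz rest) (c + 1)
        rw [this, hlen]
        push_cast
        ring

-- a closed visited set together with J-invariants characterises the reachable set
theorem closed_complete (obs : List PyObs) (start : Cell) (v : PySem.Set Cell)
    (J1 : ∀ x ∈ v, Good (freeA obs) start x)
    (J3 : ∀ x ∈ v, ∀ t ∈ nbrsOf x, freeA obs t = true → t ∈ v)
    (J4 : freeA obs start = true → start ∈ v) :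
    ∀ x, x ∈ v ↔ Good (freeA obs) start x := by
  intro x
  constructor
  · exact J1 x
  · rintro ⟨hs, hr⟩
    induction hr with
    | refl => exact J4 hs
    | tail _ hstep ih => exact J3 _ ih _ hstep.1 hstep.2

theorem floodLoopF_mem (obs : List PyObs) (start : Cell) :
    ∀ (fuel : Nat) (v : PySem.Set Cell) (q : List Cell) (c : Int),
    5 * unvisited v + q.length ≤ fuel →
    (∀ x ∈ v, Good (freeA obs) start x) →
    (∀ t ∈ q, t = start ∨ ∃ x ∈ v, t ∈ nbrsOf x) →
    (∀ x ∈ v, ∀ t ∈ nbrsOf x, freeA obs t = true → t ∈ v ∨ t ∈ q) →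
    (freeA obs start = true → start ∈ v ∨ start ∈ q) →
    ∀ x, x ∈ (floodLoopF fuel obs v q c).1 ↔ Good (freeA obs) start x := by
  intro fuel
  induction fuel with
  | zero =>
    intro v q c hfuel J1 J2 J3 J4
    have hq : q = [] := by
      cases q with
      | nil => rfl
      | cons a b => simp [List.length_cons] at hfuel
    subst hq
    simp only [floodLoopF]
    exact closed_complete obs start v J1
      (fun x hx t ht hft => ((J3 x hx t ht hft).resolve_right (by simp)))
      (fun hs => (J4 hs).resolve_right (by simp))
  | succ f ih =>
    intro v q c hfuel J1 J2 J3 J4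
    cases q with
    | nil =>
      simp only [floodLoopF]
      exact closed_complete obs start v J1
        (fun x hx t ht hft => ((J3 x hx t ht hft).resolve_right (by simp)))
        (fun hs => (J4 hs).resolve_right (by simp))
    | cons poz rest =>
      by_cases hg : (decide (poz ∈ v) || carpisma_kontrolu poz obs) = true
      · -- skip
        simp only [floodLoopF, if_pos hg]
        have hpozv : poz ∈ v ∨ carpisma_kontrolu poz obs = true := by
          rcases Bool.or_eq_true_iff.mp hg with h | h
          · exact Or.inl (of_decide_eq_true h)
          · exact Or.inr h
        refine ih v rest c (by simp at hfuel ⊢; omega) J1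
          (fun t ht => J2 t (List.mem_cons_of_mem _ ht)) ?_ ?_
        · intro x hx t ht hft
          rcases J3 x hx t ht hft with h | h
          · exact Or.inl h
          · rcases List.mem_cons.mp h with h | h
            · subst h
              rcases hpozv with h' | h'
              · exact Or.inl h'
              · unfold freeA at hft; rw [h'] at hft; cases hft
            · exact Or.inr h
        · intro hfs
          rcases J4 hfs with h | h
          · exact Or.inl h
          · rcases List.mem_cons.mp h with h | h
            · subst h
              rcases hpozv with h' | h'
              · exact Or.inl h'
              · unfold freeA at hfs; rw [h'] at hfs; cases hfs
            · exact Or.inr h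
      · -- visit
        simp only [floodLoopF, if_neg hg]
        simp only [Bool.or_eq_true, not_or, Bool.not_eq_true] at hg
        obtain ⟨hc, hk⟩ := hg
        have hfree_poz : freeA obs poz = true := by unfold freeA; rw [hk]; rfl
        have hnm : poz ∉ v := fun hm => absurd hm (of_decide_eq_false hc)
        have hgood_poz : Good (freeA obs) start poz := by
          rcases J2 poz List.mem_cons_self with h | ⟨y, hy, hny⟩
          · subst h; exact ⟨hfree_poz, Relation.ReflTransGen.refl⟩
          · have hgy := J1 y hy
            exact ⟨hgy.1, hgy.2.tail ⟨hny, hfree_poz⟩⟩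
        have hqeq := komsuEkle_eq (PySem.Set.add v poz) poz rest
        refine ih (PySem.Set.add v poz) (komsuEkle (PySem.Set.add v poz) poz rest) (c + 1) ?_ ?_ ?_ ?_ ?_
        · have h1 : unvisited (PySem.Set.add v poz) < unvisited v :=
            unvisited_lt_add _ _ (freeA_in_grid obs poz hfree_poz) hnm
          have h2 := komsuEkle_len (PySem.Set.add v poz) poz rest
          simp only [List.length_cons] at hfuel
          omega
        · intro x hx
          rcases (PySem.Set.mem_add _ _ _).mp hx with h | h
          · exact J1 x h
          · subst h; exact hgood_poz
        · intro t ht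
          rw [hqeq] at ht
          rcases List.mem_append.mp ht with h | h
          · rcases J2 t (List.mem_cons_of_mem _ h) with h' | ⟨y, hy, hny⟩
            · exact Or.inl h'
            · exact Or.inr ⟨y, (PySem.Set.mem_add _ _ _).mpr (Or.inl hy), hny⟩
          · rcases List.mem_map.mp h with ⟨yon, hyon, hty⟩
            refine Or.inr ⟨poz, (PySem.Set.mem_add _ _ _).mpr (Or.inr rfl), ?_⟩
            rw [← map_dirsA poz, ← hty]
            exact List.mem_map_of_mem (List.mem_of_mem_filter hyon)
        · intro x hx t ht hft
          rcases (PySem.Set.mem_add _ _ _).mp hx with h | h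
          · rcases J3 x h t ht hft with h' | h'
            · exact Or.inl ((PySem.Set.mem_add _ _ _).mpr (Or.inl h'))
            · rcases List.mem_cons.mp h' with h'' | h''
              · subst h''; exact Or.inl ((PySem.Set.mem_add _ _ _).mpr (Or.inr rfl))
              · exact Or.inr (by rw [hqeq]; exact List.mem_append_left _ h'')
          · subst h
            by_cases hcv : decide (t ∈ PySem.Set.add v x) = true
            · exact Or.inl (of_decide_eq_true hcv)
            · refine Or.inr ?_
              rw [hqeq]
              refine List.mem_append_right _ ?_
              rw [← map_dirsA x] at ht
              rcases List.mem_map.mp ht with ⟨yon, hyon, hty⟩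
              rw [← hty]
              refine List.mem_map_of_mem ?_
              rw [List.mem_filter]
              refine ⟨hyon, ?_⟩
              rw [hty]
              simp only [Bool.not_eq_true] at hcv
              rw [hcv]
              rfl
        · intro hfs
          rcases J4 hfs with h | h
          · exact Or.inl ((PySem.Set.mem_add _ _ _).mpr (Or.inl h))
          · rcases List.mem_cons.mp h with h | h
            · subst h; exact Or.inl ((PySem.Set.mem_add _ _ _).mpr (Or.inr rfl))
            · exact Or.inr (by rw [hqeq]; exact List.mem_append_left _ h)

-- === DFS side ===
theorem alanF_mono (fuel : Nat) (eng : List PyObs) (c : Cell) (seen : PySem.Set Cell) :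
    ∀ x, x ∈ seen → x ∈ (alanF fuel eng c seen).1 := by
  induction fuel generalizing c seen with
  | zero => simp [alanF]
  | succ f ih =>
    intro x hx
    simp only [alanF]
    by_cases hg : (decide (c ∈ seen) || !(serbest eng c)) = true
    · rw [if_pos hg]; exact hx
    · rw [if_neg hg]
      exact ih _ _ x (ih _ _ x (ih _ _ x (ih _ _ x ((PySem.Set.mem_add _ _ _).mpr (Or.inl hx)))))

theorem alanF_nodup (fuel : Nat) (eng : List PyObs) (c : Cell) (seen : PySem.Set Cell)
    (hs : seen.Nodup) : (alanF fuel eng c seen).1.Nodup := by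
  induction fuel generalizing c seen with
  | zero => simpa [alanF] using hs
  | succ f ih =>
    simp only [alanF]
    by_cases hg : (decide (c ∈ seen) || !(serbest eng c)) = true
    · rw [if_pos hg]; exact hs
    · rw [if_neg hg]
      exact ih _ _ (ih _ _ (ih _ _ (ih _ _ (PySem.Set.nodup_add _ _ hs))))

theorem alanF_count (fuel : Nat) (eng : List PyObs) (c : Cell) (seen : PySem.Set Cell) :
    (alanF fuel eng c seen).2 = ((alanF fuel eng c seen).1.length : Int) - (seen.length : Int) := by
  induction fuel generalizing c seen with
  | zero => simp [alanF]
  | succ f ih =>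
    simp only [alanF]
    by_cases hg : (decide (c ∈ seen) || !(serbest eng c)) = true
    · rw [if_pos hg]; simp
    · rw [if_neg hg]
      have hnm : c ∉ seen := by
        intro hm
        simp only [Bool.or_eq_true, not_or, Bool.not_eq_true] at hg
        exact absurd hm (of_decide_eq_false hg.1)
      have hlen : (PySem.Set.add seen c).length = seen.length + 1 := by
        rw [PySem.Set.add_of_not_mem hnm, List.length_append]; rfl
      have e1 := ih (c.1, c.2 - 20) (PySem.Set.add seen c)
      have e2 := ih (c.1, c.2 + 20) (alanF f eng (c.1, c.2 - 20) (PySem.Set.add seen c)).1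
      have e3 := ih (c.1 - 20, c.2) (alanF f eng (c.1, c.2 + 20) (alanF f eng (c.1, c.2 - 20) (PySem.Set.add seen c)).1).1
      have e4 := ih (c.1 + 20, c.2) (alanF f eng (c.1 - 20, c.2) (alanF f eng (c.1, c.2 + 20) (alanF f eng (c.1, c.2 - 20) (PySem.Set.add seen c)).1).1).1
      simp only []
      rw [e1, e2, e3, e4, hlen] at *
      push_cast
      ring

theorem alan_nonneg (eng : List PyObs) (c : Cell) :
    0 ≤ (alan eng c PySem.Set.empty).2 := by
  have h := alanF_count 240001 eng c PySem.Set.empty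
  have hm := alanF_mono 240001 eng c PySem.Set.empty
  have hsub : (PySem.Set.empty : PySem.Set Cell) ⊆ (alanF 240001 eng c PySem.Set.empty).1 := by
    intro x hx; exact hm x hx
  have hlen : ((PySem.Set.empty : PySem.Set Cell) : List Cell).length = 0 := rfl
  unfold alan
  rw [h, hlen]
  omega

theorem serbest_of_guard {eng : List PyObs} {seen : PySem.Set Cell} {c : Cell}
    (hg : ¬(decide (c ∈ seen) || !(serbest eng c)) = true) :
    freeA eng c = true ∧ c ∉ seen := by
  simp only [Bool.or_eq_true, not_or, Bool.not_eq_true] at hg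
  refine ⟨by rw [← serbest_eq]; simpa using hg.2, fun hm => ?_⟩
  exact absurd hm (of_decide_eq_false hg.1)

theorem alanF_enters (fuel : Nat) (eng : List PyObs) (c : Cell) (seen : PySem.Set Cell)
    (hfuel : 0 < fuel) (hf : freeA eng c = true) : c ∈ (alanF fuel eng c seen).1 := by
  cases fuel with
  | zero => cases hfuel
  | succ f =>
    simp only [alanF]
    by_cases hg : (decide (c ∈ seen) || !(serbest eng c)) = true
    · rw [if_pos hg]
      simp only [Bool.or_eq_true] at hg
      rcases hg with hg | hg
      · exact of_decide_eq_true hg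
      · rw [serbest_eq, hf] at hg; cases hg
    · rw [if_neg hg]
      exact alanF_mono _ _ _ _ c (alanF_mono _ _ _ _ c (alanF_mono _ _ _ _ c
        (alanF_mono _ _ _ _ c ((PySem.Set.mem_add _ _ _).mpr (Or.inr rfl)))))

theorem alanF_sound (fuel : Nat) (eng : List PyObs) (c : Cell) (seen : PySem.Set Cell) :
    ∀ x ∈ (alanF fuel eng c seen).1, x ∈ seen ∨ Good (freeA eng) c x := by
  induction fuel generalizing c seen with
  | zero => intro x hx; exact Or.inl (by simpa [alanF] using hx)
  | succ f ih =>
    intro x hx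
    simp only [alanF] at hx
    by_cases hg : (decide (c ∈ seen) || !(serbest eng c)) = true
    · rw [if_pos hg] at hx; exact Or.inl hx
    · rw [if_neg hg] at hx
      have hfc : freeA eng c = true := (serbest_of_guard hg).1
      have lift : ∀ (nb : Cell), nb ∈ nbrsOf c → Good (freeA eng) nb x → Good (freeA eng) c x := by
        intro nb hnb hgd
        exact ⟨hfc, Relation.ReflTransGen.head ⟨hnb, hgd.1⟩ hgd.2⟩
      have base : ∀ y, y ∈ PySem.Set.add seen c → y ∈ seen ∨ Good (freeA eng) c y := by
        intro y hy
        rcases (PySem.Set.mem_add _ _ _).mp hy with hy | hy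
        · exact Or.inl hy
        · subst hy; exact Or.inr ⟨hfc, Relation.ReflTransGen.refl⟩
      rcases ih _ _ x hx with h4 | h4
      · rcases ih _ _ x h4 with h3 | h3
        · rcases ih _ _ x h3 with h2 | h2
          · rcases ih _ _ x h2 with h1 | h1
            · exact base x h1
            · exact Or.inr (lift _ (by simp [nbrsOf]) h1)
          · exact Or.inr (lift _ (by simp [nbrsOf]) h2)
        · exact Or.inr (lift _ (by simp [nbrsOf]) h3)
      · exact Or.inr (lift _ (by simp [nbrsOf]) h4)

theorem unvisited_step (eng : List PyObs) (seen : PySem.Set Cell) (c : Cell)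
    (hg : ¬(decide (c ∈ seen) || !(serbest eng c)) = true) :
    unvisited (PySem.Set.add seen c) < unvisited seen := by
  obtain ⟨hfc, hnm⟩ := serbest_of_guard hg
  exact unvisited_lt_add _ _ (freeA_in_grid _ _ hfc) hnm

theorem alanF_closed (fuel : Nat) (eng : List PyObs) (c : Cell) (seen : PySem.Set Cell)
    (hfuel : unvisited seen < fuel) :
    ∀ x ∈ (alanF fuel eng c seen).1, x ∈ seen ∨
      (∀ t ∈ nbrsOf x, freeA eng t = true → t ∈ (alanF fuel eng c seen).1) := by
  induction fuel generalizing c seen with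
  | zero => cases hfuel
  | succ f ih =>
    intro x hx
    by_cases hg : (decide (c ∈ seen) || !(serbest eng c)) = true
    · simp only [alanF, if_pos hg] at hx ⊢
      exact Or.inl hx
    · simp only [alanF, if_neg hg] at hx ⊢
      have hfc : freeA eng c = true := (serbest_of_guard hg).1
      have hstep := unvisited_step eng seen c hg
      have hf1 : unvisited (PySem.Set.add seen c) < f := by omega
      have m1 := alanF_mono f eng (c.1, c.2 - 20) (PySem.Set.add seen c)
      have hf2 : unvisited (alanF f eng (c.1, c.2 - 20) (PySem.Set.add seen c)).1 < f :=
        Nat.lt_of_le_of_lt (unvisited_mono _ _ m1) hf1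
      have m2 := alanF_mono f eng (c.1, c.2 + 20) (alanF f eng (c.1, c.2 - 20) (PySem.Set.add seen c)).1
      have hf3 : unvisited (alanF f eng (c.1, c.2 + 20) (alanF f eng (c.1, c.2 - 20) (PySem.Set.add seen c)).1).1 < f :=
        Nat.lt_of_le_of_lt (unvisited_mono _ _ m2) hf2
      have m3 := alanF_mono f eng (c.1 - 20, c.2) (alanF f eng (c.1, c.2 + 20) (alanF f eng (c.1, c.2 - 20) (PySem.Set.add seen c)).1).1
      have hf4 : unvisited (alanF f eng (c.1 - 20, c.2) (alanF f eng (c.1, c.2 + 20) (alanF f eng (c.1, c.2 - 20) (PySem.Set.add seen c)).1).1).1 < f :=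
        Nat.lt_of_le_of_lt (unvisited_mono _ _ m3) hf3
      have m4 := alanF_mono f eng (c.1 + 20, c.2) (alanF f eng (c.1 - 20, c.2) (alanF f eng (c.1, c.2 + 20) (alanF f eng (c.1, c.2 - 20) (PySem.Set.add seen c)).1).1).1
      have hcclose : ∀ t ∈ nbrsOf c, freeA eng t = true →
          t ∈ (alanF f eng (c.1 + 20, c.2) (alanF f eng (c.1 - 20, c.2) (alanF f eng (c.1, c.2 + 20) (alanF f eng (c.1, c.2 - 20) (PySem.Set.add seen c)).1).1).1).1 := by
        intro t ht hft
        simp only [nbrsOf, List.mem_cons, List.not_mem_nil, or_false] at ht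
        rcases ht with ht | ht | ht | ht
        · subst ht
          exact m4 _ (m3 _ (m2 _ (alanF_enters f eng _ _ (by omega) hft)))
        · subst ht
          exact m4 _ (m3 _ (alanF_enters f eng _ _ (by omega) hft))
        · subst ht
          exact m4 _ (alanF_enters f eng _ _ (by omega) hft)
        · subst ht
          exact alanF_enters f eng _ _ (by omega) hft
      rcases ih _ _ hf4 x hx with h4 | h4
      · rcases ih _ _ hf3 x h4 with h3 | h3
        · rcases ih _ _ hf2 x h3 with h2 | h2
          · rcases ih _ _ hf1 x h2 with h1 | h1
            · rcases (PySem.Set.mem_add _ _ _).mp h1 with h0 | h0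
              · exact Or.inl h0
              · subst h0; exact Or.inr hcclose
            · exact Or.inr (fun t ht hft => m4 _ (m3 _ (m2 _ (h1 t ht hft))))
          · exact Or.inr (fun t ht hft => m4 _ (m3 _ (h2 t ht hft)))
        · exact Or.inr (fun t ht hft => m4 _ (h3 t ht hft))
      · exact Or.inr h4

theorem alan_mem (eng : List PyObs) (start : Cell) :
    ∀ x, x ∈ (alan eng start PySem.Set.empty).1 ↔ Good (freeA eng) start x := by
  intro x
  constructor
  · intro hx
    rcases alanF_sound 240001 eng start PySem.Set.empty x hx with h | h
    · cases h
    · exact h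
  · rintro ⟨hs, hr⟩
    have hfuel : unvisited (PySem.Set.empty : PySem.Set Cell) < 240001 :=
      Nat.lt_succ_of_le (unvisited_le _)
    induction hr with
    | refl => exact alanF_enters _ _ _ _ (by omega) hs
    | tail _ hstep ih =>
      rcases alanF_closed 240001 eng start PySem.Set.empty hfuel _ ih with h | h
      · cases h
      · exact h _ hstep.1 hstep.2

-- === BFS count = DFS count ===
theorem flood_eq (eng : List PyObs) (start : Cell) :
    flood_fill start eng = (alan eng start PySem.Set.empty).2 := by
  have hemp : ((PySem.Set.empty : PySem.Set Cell) : List Cell) = [] := rfl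
  have hVA := floodLoopF_mem eng start 1200002 PySem.Set.empty [start] 0
    (by have := unvisited_le (PySem.Set.empty : PySem.Set Cell); simp only [List.length_cons, List.length_nil]; omega)
    (by intro x hx; rw [hemp] at hx; cases hx)
    (by intro t ht; rcases List.mem_cons.mp ht with h | h
        · exact Or.inl h
        · cases h)
    (by intro x hx; rw [hemp] at hx; cases hx)
    (fun _ => Or.inr List.mem_cons_self)
  have hVD := alan_mem eng start
  have ndA : (floodLoopF 1200002 eng PySem.Set.empty [start] 0).1.Nodup :=
    floodLoopF_nodup _ _ _ _ _ (by rw [hemp]; exact List.nodup_nil)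
  have ndD : (alan eng start PySem.Set.empty).1.Nodup :=
    alanF_nodup _ _ _ _ (by rw [hemp]; exact List.nodup_nil)
  have hperm : (floodLoopF 1200002 eng PySem.Set.empty [start] 0).1.Perm (alan eng start PySem.Set.empty).1 :=
    (List.perm_ext_iff_of_nodup ndA ndD).mpr (fun a => (hVA a).trans (hVD a).symm)
  have hlen := hperm.length_eq
  have hcA := floodLoopF_count 1200002 eng PySem.Set.empty [start] 0
  have hcD := alanF_count 240001 eng start PySem.Set.empty
  unfold flood_fill
  rw [hcA]
  unfold alan at hlen ⊢
  rw [hcD, hlen, hemp]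
  simp

-- === selection: A's running-max fold vs B's max? over the candidate list ===
def SelInv (k0 k1 : Int) (st : Int × Option Cell) (acc : Option (Int × Cell)) : Prop :=
  (st.2 = none ∧ acc = none ∧ st.1 = -1) ∨
  (∃ yon : Cell, st.2 = some yon ∧ acc = some (st.1, (k0 + yon.1 * 20, k1 + yon.2 * 20)))

theorem sel_rel (eng : List PyObs) (k0 k1 : Int) :
    ∀ (ds : List Cell) (st : Int × Option Cell) (acc : Option (Int × Cell)),
    SelInv k0 k1 st acc →
    SelInv k0 k1
      (ds.foldl (fun (st : Int × Option Cell) yon =>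
        if carpisma_kontrolu (k0 + yon.1 * 20, k1 + yon.2 * 20) eng then st
        else
          let bosluk := flood_fill (k0 + yon.1 * 20, k1 + yon.2 * 20) eng
          if st.1 < bosluk then (bosluk, some yon) else st) st)
      (ds.foldl (fun (acc : Option (Int × Cell)) yon =>
        if serbest eng (k0 + yon.1 * 20, k1 + yon.2 * 20) then
          match acc with
          | none => some ((alan eng (k0 + yon.1 * 20, k1 + yon.2 * 20) PySem.Set.empty).2,
                          (k0 + yon.1 * 20, k1 + yon.2 * 20))
          | some m => if m.1 < (alan eng (k0 + yon.1 * 20, k1 + yon.2 * 20) PySem.Set.empty).2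
                      then some ((alan eng (k0 + yon.1 * 20, k1 + yon.2 * 20) PySem.Set.empty).2,
                                 (k0 + yon.1 * 20, k1 + yon.2 * 20))
                      else some m
        else acc) acc) := by
  intro ds
  induction ds with
  | nil => intro st acc h; exact h
  | cons y t ih =>
    intro st acc h
    simp only [List.foldl_cons]
    by_cases hc : carpisma_kontrolu (k0 + y.1 * 20, k1 + y.2 * 20) eng = true
    · have hs : serbest eng (k0 + y.1 * 20, k1 + y.2 * 20) = false := by
        rw [serbest_eq]; unfold freeA; rw [hc]; rfl
      rw [if_pos hc, hs]
      simp only [Bool.false_eq_true, if_false]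
      exact ih st acc h
    · have hs : serbest eng (k0 + y.1 * 20, k1 + y.2 * 20) = true := by
        rw [serbest_eq]; unfold freeA
        simp only [Bool.not_eq_true] at hc
        rw [hc]; rfl
      rw [if_neg hc, hs, if_pos rfl]
      rw [flood_eq eng (k0 + y.1 * 20, k1 + y.2 * 20)]
      have hnn := alan_nonneg eng (k0 + y.1 * 20, k1 + y.2 * 20)
      rcases h with ⟨h2, hacc, h1⟩ | ⟨yon, h2, hacc⟩
      · obtain ⟨m, o⟩ := st
        simp only at h1 h2
        subst h1; subst h2; subst hacc
        rw [if_pos (by omega : (-1 : Int) < (alan eng (k0 + y.1 * 20, k1 + y.2 * 20) PySem.Set.empty).2)]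
        exact ih _ _ (Or.inr ⟨y, rfl, rfl⟩)
      · obtain ⟨m, o⟩ := st
        simp only at h2 hacc
        subst h2; subst hacc
        by_cases hlt : m < (alan eng (k0 + y.1 * 20, k1 + y.2 * 20) PySem.Set.empty).2
        · rw [if_pos hlt]
          simp only [if_pos hlt]
          exact ih _ _ (Or.inr ⟨y, rfl, rfl⟩)
        · rw [if_neg hlt]
          simp only [if_neg hlt]
          exact ih _ _ (Or.inr ⟨yon, rfl, rfl⟩)

-- === the greedy outer loops agree ===
theorem surv_eq : ∀ (n : Nat) (kafa : List Int) (eng : List PyObs),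
    survLoopA kafa eng n = survLoopB kafa eng n := by
  intro n
  induction n with
  | zero => intro kafa eng; rfl
  | succ n ihn =>
    intro kafa eng
    simp only [survLoopA, survLoopB]
    set k0 := (PySem.List.pyGet? kafa 0).getD 0 with hk0
    set k1 := (PySem.List.pyGet? kafa 1).getD 0 with hk1
    have hkoms : ([(k0, k1 - 20), (k0, k1 + 20), (k0 - 20, k1), (k0 + 20, k1)] : List Cell)
        = dirsA.map (fun yon => (k0 + yon.1 * 20, k1 + yon.2 * 20)) := by
      simp [dirsA, Prod.ext_iff]
      omega
    rw [hkoms]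
    rw [List.filter_map, List.map_map]
    show (match (dirsA.foldl (fun (st : Int × Option Cell) yon =>
        if carpisma_kontrolu (k0 + yon.1 * 20, k1 + yon.2 * 20) eng then st
        else
          let bosluk := flood_fill (k0 + yon.1 * 20, k1 + yon.2 * 20) eng
          if st.1 < bosluk then (bosluk, some yon) else st)
        ((-1 : Int), (none : Option Cell))).2 with
      | none => false
      | some yon =>
        survLoopA [k0 + yon.1 * 20, k1 + yon.2 * 20]
          ((PyObs.tup (k0 + yon.1 * 20) (k1 + yon.2 * 20) :: eng).dropLast) n) = _
    rw [show PySem.List.max?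
        ((dirsA.filter (serbest eng ∘ fun yon => (k0 + yon.1 * 20, k1 + yon.2 * 20))).map
          ((fun komsu => ((alan eng komsu PySem.Set.empty).2, komsu)) ∘
            fun yon => (k0 + yon.1 * 20, k1 + yon.2 * 20)))
        (fun aday => aday.1)
      = dirsA.foldl (fun (acc : Option (Int × Cell)) yon =>
        if serbest eng (k0 + yon.1 * 20, k1 + yon.2 * 20) then
          match acc with
          | none => some ((alan eng (k0 + yon.1 * 20, k1 + yon.2 * 20) PySem.Set.empty).2,
                          (k0 + yon.1 * 20, k1 + yon.2 * 20))
          | some m => if m.1 < (alan eng (k0 + yon.1 * 20, k1 + yon.2 * 20) PySem.Set.empty).2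
                      then some ((alan eng (k0 + yon.1 * 20, k1 + yon.2 * 20) PySem.Set.empty).2,
                                 (k0 + yon.1 * 20, k1 + yon.2 * 20))
                      else some m
        else acc) none from by
      unfold PySem.List.max?
      rw [List.foldl_map, List.foldl_filter]
      simp only [Function.comp_apply]
      refine congrArg (fun f => List.foldl f (none : Option (Int × Cell)) dirsA) ?_
      funext x y
      cases x <;> rfl]
    have hinv := sel_rel eng k0 k1 dirsA ((-1 : Int), (none : Option Cell)) none
      (Or.inl ⟨rfl, rfl, rfl⟩)
    rcases hinv with ⟨hA2, hB, _⟩ | ⟨yon, hA2, hB⟩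
    · rw [hA2, hB]
    · rw [hA2, hB]
      exact ihn _ _

-- ===== VERDICT =====
theorem hayatta_kalabilir_mi_spec : Claim_equal_hayatta_kalabilir_mi := by
  intro bas eng hm _ _
  unfold Spec_hayatta_kalabilir_mi hayatta_kalabilir_mi hayatta_kalabilir_mi_alt
  exact surv_eq hm.toNat bas (eng.map PyObs.lst)
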